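-- pv_equiv track=rewrite | github.com/tobe-honest/AlgorithmStudy | seungIl/week10/22857_S2_가장긴짝수연속한부분수열.py | solution
-- ===== SOURCE A (Python) =====
-- def solution(n, k, nums):
--     s = 0 # start
--     e = 0 # end
--     answer = 0 # max of even
--     del_cnt = 0 # delete count
--     even_cnt = 0 # temp of even count
--     while s <= e < n:
--         # 삭제 횟수가 k를 넘어섰을 때 -> 시작점 줄여주기 -> 요소들을 더 추가하기 위한 작업
--         if del_cnt > k:
--             # 시작점이 짝수
--             if nums[s] % 2 == 0:
--                 even_cnt -= 1 # 현재 짝수 개수 -1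
--                 s += 1 # 시작점 오른쪽으로 이동 -> 요소 줄이기
--             # 시작점이 홀수
--             else:
--                 del_cnt -= 1 # 삭제 횟수 -1
--                 s += 1
--         else: # 삭제 횟수가 k 이하일 때 -> 끝점 늘려주기
--             if nums[e] % 2 == 0:
--                 even_cnt += 1 # 현재 짝수 개수 +1
--                 e += 1 # 끝점 오른쪽으로 이동 -> 요소 늘리기
--             else:
--                 del_cnt += 1 # 삭제 횟수 +1
--                 e += 1
--
--         # if del_cnt < k: # 해도 되고 안해도 됨 (차피 삭제 횟수가 k를 넘어서는 경우는 끝점에서 홀수가 들어오는 경우)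
--         answer = max(answer, even_cnt)
--     return answer
-- ===== SOURCE B (Python) =====
-- def solution(n, k, nums):
--     if k < 0:
--         return 0
--     m = n if n > 0 else 0
--     xs = nums[:m]
--     odds = [i for i, x in enumerate(xs) if x % 2 != 0]
--     t = len(odds)
--     if t <= k:
--         return len(xs) - t
--     P = [-1] + odds + [len(xs)]
--     best = 0
--     for i in range(1, t - k + 2):
--         best = max(best, P[i + k] - P[i - 1] - 1 - k)
--     return best
-- ===== Notes on version B (the rewrite author's own statement) =====
-- stated objective: faster
-- what changed: Replaces the element-by-element two-pointer sliding window with a single pass that collects the indices of odd elements and then scans that (sentinel-padded) index table, computing each maximal k-odd window's even count by arithmetic on consecutive odd positions.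
import Mathlib
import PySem

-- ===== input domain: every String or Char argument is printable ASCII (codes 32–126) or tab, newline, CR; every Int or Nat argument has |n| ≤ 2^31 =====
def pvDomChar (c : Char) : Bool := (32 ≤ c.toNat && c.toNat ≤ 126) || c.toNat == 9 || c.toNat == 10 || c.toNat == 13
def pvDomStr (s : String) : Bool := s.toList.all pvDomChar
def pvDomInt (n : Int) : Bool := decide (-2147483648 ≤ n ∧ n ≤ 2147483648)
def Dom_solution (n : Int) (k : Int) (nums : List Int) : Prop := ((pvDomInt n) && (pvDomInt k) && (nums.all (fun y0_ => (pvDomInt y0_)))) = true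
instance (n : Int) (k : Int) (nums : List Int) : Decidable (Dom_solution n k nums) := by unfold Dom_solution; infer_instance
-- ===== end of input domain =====

-- B replaces A's element-by-element two-pointer window with a pass over the table of odd-element
-- indices (sentinel-padded), computing each maximal k-odd window's even count arithmetically (objective: faster, constant factor).

-- ===== PORT A =====
-- literal transliteration of A's while loop; state (s, e, del_cnt, even_cnt, answer)
def solnLoopA (n k : Int) (nums : List Int) (s e del ev ans : Int) : Int :=
  if h : s ≤ e ∧ e < n then
    if k < del then  -- del_cnt > k: shrink from the left
      if PySem.Int.mod (PySem.List.pyGetD nums s 0) 2 == 0 then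
        solnLoopA n k nums (s+1) e del (ev-1) (max ans (ev-1))
      else
        solnLoopA n k nums (s+1) e (del-1) ev (max ans ev)
    else  -- extend on the right
      if PySem.Int.mod (PySem.List.pyGetD nums e 0) 2 == 0 then
        solnLoopA n k nums s (e+1) del (ev+1) (max ans (ev+1))
      else
        solnLoopA n k nums s (e+1) (del+1) ev (max ans ev)
  else ans
termination_by (2*n - s - e).toNat
decreasing_by all_goals omega

def solution (n : Int) (k : Int) (nums : List Int) : Int :=
  solnLoopA n k nums 0 0 0 0 0

-- ===== PORT B =====
def solution_alt (n : Int) (k : Int) (nums : List Int) : Int :=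
  if k < 0 then 0
  else
    let m : Int := if 0 < n then n else 0
    let xs : List Int := nums.take m.toNat   -- nums[:m], m ≥ 0 (Python slice clamps)
    let odds : List Int := ((PySem.List.enumerate xs 0).filter
        (fun p => !(PySem.Int.mod p.2 2 == 0))).map (fun p => p.1)
    let t : Int := (odds.length : Int)
    if t ≤ k then (xs.length : Int) - t
    else
      let P : List Int := [(-1 : Int)] ++ odds ++ [(xs.length : Int)]
      (PySem.List.pyRange 1 (t - k + 2) 1).foldl
        (fun best i => max best (PySem.List.pyGetD P (i + k) 0 - PySem.List.pyGetD P (i - 1) 0 - 1 - k)) 0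

-- ===== PRECONDITION & SPEC =====
-- Pre_ excludes exactly the inputs where A raises IndexError: n exceeding len(nums) makes the
-- window's end index run off the list (unless k < 0, where A only ever reads nums[0]).
def Pre_solution (n : Int) (k : Int) (nums : List Int) : Prop :=
  n ≤ (nums.length : Int) ∨ (k < 0 ∧ nums ≠ [])
instance (n : Int) (k : Int) (nums : List Int) : Decidable (Pre_solution n k nums) := by
  unfold Pre_solution; infer_instance

def pvWitness_solution : Int × Int × List Int := (3, 1, [2, 1, 4])

def Spec_solution (n : Int) (k : Int) (nums : List Int) (out : Int) : Prop := out = solution_alt n k nums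
instance (n : Int) (k : Int) (nums : List Int) (out : Int) : Decidable (Spec_solution n k nums out) := by unfold Spec_solution; infer_instance

-- ===== CLAIM (what is proved, stated in full; the proofs are below) =====
def Claim_equal_solution : Prop := ∀ (n : Int) (k : Int) (nums : List Int), Dom_solution n k nums → Pre_solution n k nums → Spec_solution n k nums (solution n k nums)

-- ===== LEMMAS AND PROOFS =====

-- the parity predicate both programs test
def podd (x : Int) : Bool := !(PySem.Int.mod x 2 == 0)

-- odd / even counts of the window xs[a:b]
def oc (xs : List Int) (a b : Nat) : Nat := ((xs.take b).drop a).countP podd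
def ec (xs : List Int) (a b : Nat) : Nat := ((xs.take b).drop a).countP (fun x => !podd x)

-- best even count over valid windows (≤ kk odds) contained in xs[0:e]
def Hh (xs : List Int) (kk e : Nat) : Nat :=
  Finset.sup (((Finset.range (e+1)) ×ˢ (Finset.range (e+1))).filter
      (fun p => p.1 ≤ p.2 ∧ oc xs p.1 p.2 ≤ kk))
    (fun p => ec xs p.1 p.2)

theorem le_Hh (xs : List Int) (kk : Nat) {a b e : Nat} (hab : a ≤ b) (hbe : b ≤ e)
    (hv : oc xs a b ≤ kk) : ec xs a b ≤ Hh xs kk e := by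
  apply Finset.le_sup (f := fun p : Nat × Nat => ec xs p.1 p.2) (b := (a, b))
  simp [Finset.mem_filter, Finset.mem_product, Finset.mem_range]
  exact ⟨⟨by omega, by omega⟩, hab, hv⟩

theorem Hh_le (xs : List Int) (kk e c : Nat)
    (h : ∀ a b, a ≤ b → b ≤ e → oc xs a b ≤ kk → ec xs a b ≤ c) : Hh xs kk e ≤ c := by
  apply Finset.sup_le
  intro p hp
  simp [Finset.mem_filter, Finset.mem_product, Finset.mem_range] at hp
  exact h p.1 p.2 hp.2.1 (by omega) hp.2.2

theorem Hh_mono (xs : List Int) (kk : Nat) {e e' : Nat} (h : e ≤ e') : Hh xs kk e ≤ Hh xs kk e' := by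
  apply Hh_le
  intro a b hab hbe hv
  exact le_Hh xs kk hab (by omega) hv

theorem Hh_zero (xs : List Int) (kk : Nat) : Hh xs kk 0 = 0 := by
  apply Nat.le_zero.mp
  apply Hh_le
  intro a b hab hbe _
  have ha : a = 0 := by omega
  have hb : b = 0 := by omega
  subst ha hb
  simp [ec]

-- segment xs[a:b] step lemmas
theorem seg_snoc (xs : List Int) {a b : Nat} (hab : a ≤ b) (hb : b < xs.length) :
    (xs.take (b+1)).drop a = (xs.take b).drop a ++ [xs[b]] := by
  rw [List.take_add_one, List.drop_append_of_le_length (by simp; omega)]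
  simp [List.getElem?_eq_getElem hb]

theorem seg_cons (xs : List Int) {a b : Nat} (hab : a < b) (ha : a < xs.length) :
    (xs.take b).drop a = xs[a] :: (xs.take b).drop (a+1) := by
  have h : a < (xs.take b).length := by simp; omega
  rw [List.drop_eq_getElem_cons h]
  congr 1
  simp

theorem oc_snoc (xs : List Int) {a b : Nat} (hab : a ≤ b) (hb : b < xs.length) :
    oc xs a (b+1) = oc xs a b + (if podd xs[b] then 1 else 0) := by
  unfold oc; rw [seg_snoc xs hab hb, List.countP_append]; simp [List.countP_cons]

theorem ec_snoc (xs : List Int) {a b : Nat} (hab : a ≤ b) (hb : b < xs.length) :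
    ec xs a (b+1) = ec xs a b + (if podd xs[b] then 0 else 1) := by
  unfold ec; rw [seg_snoc xs hab hb, List.countP_append]
  by_cases h : podd xs[b] <;> simp [List.countP_cons, h]

theorem oc_cons (xs : List Int) {a b : Nat} (hab : a < b) (ha : a < xs.length) :
    oc xs a b = (if podd xs[a] then 1 else 0) + oc xs (a+1) b := by
  unfold oc; rw [seg_cons xs hab ha]
  by_cases h : podd xs[a] <;> simp [List.countP_cons, h] <;> omega

theorem ec_cons (xs : List Int) {a b : Nat} (hab : a < b) (ha : a < xs.length) :
    ec xs a b = (if podd xs[a] then 0 else 1) + ec xs (a+1) b := by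
  unfold ec; rw [seg_cons xs hab ha]
  by_cases h : podd xs[a] <;> simp [List.countP_cons, h] <;> omega

theorem oc_diag (xs : List Int) (a b : Nat) (h : b ≤ a) : oc xs a b = 0 := by
  unfold oc
  rw [List.drop_eq_nil_of_le (by simp; omega)]
  simp

theorem ec_diag (xs : List Int) (a b : Nat) (h : b ≤ a) : ec xs a b = 0 := by
  unfold ec
  rw [List.drop_eq_nil_of_le (by simp; omega)]
  simp

theorem seg_eq_drop_take (xs : List Int) (a b : Nat) :
    (xs.take b).drop a = (xs.drop a).take (b - a) := List.drop_take ..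

theorem oc_mono_left (xs : List Int) {a a' b : Nat} (h : a' ≤ a) :
    oc xs a b ≤ oc xs a' b := by
  unfold oc
  have : (xs.take b).drop a = ((xs.take b).drop a').drop (a - a') := by
    rw [List.drop_drop]; congr 1; omega
  rw [this]
  exact (List.drop_sublist _ _).countP_le

theorem ec_mono_left (xs : List Int) {a a' b : Nat} (h : a' ≤ a) :
    ec xs a b ≤ ec xs a' b := by
  unfold ec
  have : (xs.take b).drop a = ((xs.take b).drop a').drop (a - a') := by
    rw [List.drop_drop]; congr 1; omega
  rw [this]
  exact (List.drop_sublist _ _).countP_le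

theorem oc_mono_right (xs : List Int) {a b b' : Nat} (h : b ≤ b') :
    oc xs a b ≤ oc xs a b' := by
  unfold oc
  rw [seg_eq_drop_take, seg_eq_drop_take]
  have : (xs.drop a).take (b - a) = ((xs.drop a).take (b' - a)).take (b - a) := by
    rw [List.take_take]; congr 1; omega
  rw [this]
  exact (List.take_sublist _ _).countP_le

theorem ec_mono_right (xs : List Int) {a b b' : Nat} (h : b ≤ b') :
    ec xs a b ≤ ec xs a b' := by
  unfold ec
  rw [seg_eq_drop_take, seg_eq_drop_take]
  have : (xs.drop a).take (b - a) = ((xs.drop a).take (b' - a)).take (b - a) := by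
    rw [List.take_take]; congr 1; omega
  rw [this]
  exact (List.take_sublist _ _).countP_le

theorem oc_pos_lt (xs : List Int) {a b : Nat} (h : 0 < oc xs a b) : a < b := by
  by_contra hc
  rw [oc_diag xs a b (by omega)] at h
  omega

-- growing onto a valid window: the new best is the max of the old best and the new window
theorem Hh_grow_valid (xs : List Int) (kk : Nat) {s e : Nat} (hse : s ≤ e) (he : e < xs.length)
    (hv : oc xs s (e+1) ≤ kk) (hmin : 0 < s → kk < oc xs (s-1) (e+1)) :
    Hh xs kk (e+1) = max (Hh xs kk e) (ec xs s (e+1)) := by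
  apply Nat.le_antisymm
  · apply Hh_le
    intro a b hab hbe hvab
    rcases Nat.lt_or_ge b (e+1) with hb | hb
    · exact le_trans (le_Hh xs kk hab (by omega) hvab) (le_max_left _ _)
    · have hbeq : b = e + 1 := by omega
      subst hbeq
      rcases Nat.lt_or_ge a s with ha | ha
      · exfalso
        have h1 := hmin (by omega)
        have h2 : oc xs (s-1) (e+1) ≤ oc xs a (e+1) := oc_mono_left xs (by omega)
        omega
      · exact le_trans (ec_mono_left xs ha) (le_max_right _ _)
  · apply Nat.max_le.mpr
    exact ⟨Hh_mono xs kk (by omega), le_Hh xs kk (by omega) (by omega) hv⟩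

-- appending an odd element does not change the best
theorem Hh_snoc_odd (xs : List Int) (kk : Nat) {e : Nat} (he : e < xs.length)
    (ho : podd xs[e]) : Hh xs kk (e+1) = Hh xs kk e := by
  apply Nat.le_antisymm
  · apply Hh_le
    intro a b hab hbe hvab
    rcases Nat.lt_or_ge b (e+1) with hb | hb
    · exact le_Hh xs kk hab (by omega) hvab
    · have hbeq : b = e + 1 := by omega
      subst hbeq
      rcases Nat.lt_or_ge a (e+1) with ha | ha
      · have hae : a ≤ e := by omega
        have h1 : ec xs a (e+1) = ec xs a e := by
          rw [ec_snoc xs hae he]; simp [ho]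
        have h2 : oc xs a e ≤ oc xs a (e+1) := oc_mono_right xs (by omega)
        rw [h1]
        exact le_Hh xs kk hae (by omega) (by omega)
      · have : ec xs a (e+1) = 0 := ec_diag xs a (e+1) (by omega)
        omega
  · exact Hh_mono xs kk (by omega)

theorem prefix_getD (nums xs : List Int) (hxs : xs <+: nums) (s : Nat) (hs : s < xs.length) :
    PySem.List.pyGetD nums (s : Int) 0 = xs[s] := by
  rw [PySem.List.pyGetD_natCast]
  rw [List.getD_eq_getElem _ _ (Nat.lt_of_lt_of_le hs hxs.length_le)]
  exact (hxs.getElem hs).symm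

theorem parity_if (x : Int) : (PySem.Int.mod x 2 == 0) = !podd x := by simp [podd]

-- A's loop, under its invariant, computes the best valid window of the whole prefix
theorem mainA (nums xs : List Int) (kk : Nat) (hxs : xs <+: nums) (N : Nat) :
    ∀ (s e del ev ans : Nat),
      2*xs.length - s - e ≤ N →
      s ≤ e → e ≤ xs.length →
      del = oc xs s e → ev = ec xs s e → del ≤ kk + 1 →
      (del = kk+1 → 0 < e ∧ podd (xs.getD (e-1) 0)) →
      (0 < s → kk < oc xs (s-1) e) →
      ans = Hh xs kk e →
      solnLoopA (xs.length : Int) (kk : Int) nums s e del ev ans = (Hh xs kk xs.length : Int) := by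
  induction N with
  | zero =>
    intro s e del ev ans hN hse hel hdel hev hdk hcond hmin hans
    have he : e = xs.length := by omega
    rw [solnLoopA, dif_neg (by push_cast; omega)]
    rw [hans, he]
  | succ N ih =>
    intro s e del ev ans hN hse hel hdel hev hdk hcond hmin hans
    rcases Nat.lt_or_ge e xs.length with hel' | hel'
    · rw [solnLoopA, dif_pos (by constructor <;> push_cast <;> omega)]
      rcases Nat.lt_or_ge kk del with hgt | hle
      · -- shrink: del = kk+1
        have hdel1 : del = kk + 1 := by omega
        obtain ⟨hepos, hoddlast⟩ := hcond hdel1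
        have hslt : s < e := oc_pos_lt xs (by omega)
        have hslen : s < xs.length := by omega
        have helast : e - 1 < xs.length := by omega
        have hoddlast' : podd (xs[e-1]) := by
          rwa [List.getD_eq_getElem _ _ helast] at hoddlast
        have hocc : oc xs s e = oc xs s (e-1) + 1 := by
          have := oc_snoc xs (a := s) (b := e-1) (by omega) helast
          simpa [Nat.sub_add_cancel (by omega : 1 ≤ e), hoddlast'] using this
        have hecc : ec xs s e = ec xs s (e-1) := by
          have := ec_snoc xs (a := s) (b := e-1) (by omega) helast
          simpa [Nat.sub_add_cancel (by omega : 1 ≤ e), hoddlast'] using this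
        have hbound : ec xs s (e-1) ≤ Hh xs kk e :=
          le_Hh xs kk (by omega) (by omega) (by omega)
        rw [if_pos (by exact_mod_cast hgt)]
        rw [prefix_getD nums xs hxs s hslen, parity_if]
        cases hp : podd xs[s] with
        | true =>
          -- start is odd: drop it, del decreases
          simp only [Bool.not_true, Bool.false_eq_true, if_false]
          have hoc : oc xs s e = 1 + oc xs (s+1) e := by
            have := oc_cons xs hslt hslen; simpa [hp] using this
          have hec : ec xs s e = ec xs (s+1) e := by
            have := ec_cons xs hslt hslen; simpa [hp] using this
          have hevle : ev ≤ Hh xs kk e := by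
            rw [hev, hec]
            exact le_Hh xs kk (by omega) (by omega) (by omega)
          have hd1 : (del : Int) - 1 = ((del - 1 : Nat) : Int) := by push_cast; omega
          have hsx : (s : Int) + 1 = ((s+1 : Nat) : Int) := by push_cast; ring
          rw [hd1, hsx, show max (ans : Int) (ev : Int) = ((max ans ev : Nat) : Int) by push_cast; rfl]
          apply ih (s+1) e (del-1) ev (max ans ev) (by omega) (by omega) hel
          · omega
          · omega
          · omega
          · intro h; omega
          · intro _; have h : kk < oc xs s e := by omega
            simpa using h
          · rw [hans]; omega
        | false =>
          -- start is even: drop it, even count decreases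
          simp only [Bool.not_false, if_true]
          have hoc : oc xs s e = oc xs (s+1) e := by
            have := oc_cons xs hslt hslen; simpa [hp] using this
          have hec : ec xs s e = 1 + ec xs (s+1) e := by
            have := ec_cons xs hslt hslen; simpa [hp] using this
          have hev1 : 1 ≤ ev := by omega
          have hevle : ev - 1 ≤ Hh xs kk e := by
            have h1 : ec xs (s+1) e ≤ ec xs s e := ec_mono_left xs (by omega)
            omega
          have hsx : (s : Int) + 1 = ((s+1 : Nat) : Int) := by push_cast; ring
          have hevx : (ev : Int) - 1 = ((ev - 1 : Nat) : Int) := by push_cast; omega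
          rw [hsx, hevx, show max (ans : Int) ((ev - 1 : Nat) : Int) = ((max ans (ev-1) : Nat) : Int) by push_cast; rfl]
          apply ih (s+1) e del (ev-1) (max ans (ev-1)) (by omega) (by omega) hel
          · omega
          · omega
          · omega
          · intro h; exact ⟨hepos, hoddlast⟩
          · intro _; have h : kk < oc xs s e := by omega
            simpa using h
          · rw [hans]; omega
      · -- grow
        rw [if_neg (by push_cast; omega)]
        rw [prefix_getD nums xs hxs e hel', parity_if]
        cases hp : podd xs[e] with
        | true =>
          -- new element odd
          simp only [Bool.not_true, Bool.false_eq_true, if_false]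
          have hoc : oc xs s (e+1) = oc xs s e + 1 := by
            have := oc_snoc xs hse hel'; simpa [hp] using this
          have hec : ec xs s (e+1) = ec xs s e := by
            have := ec_snoc xs hse hel'; simpa [hp] using this
          have hH : Hh xs kk (e+1) = Hh xs kk e := Hh_snoc_odd xs kk hel' hp
          have hevle : ev ≤ Hh xs kk e := by
            rw [hev]; exact le_Hh xs kk hse (by omega) (by omega)
          have hdx : (del : Int) + 1 = ((del + 1 : Nat) : Int) := by push_cast; ring
          have hex : (e : Int) + 1 = ((e+1 : Nat) : Int) := by push_cast; ring
          rw [hdx, hex, show max (ans : Int) (ev : Int) = ((max ans ev : Nat) : Int) by push_cast; rfl]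
          apply ih s (e+1) (del+1) ev (max ans ev) (by omega) (by omega) (by omega)
          · omega
          · omega
          · omega
          · intro _
            refine ⟨by omega, ?_⟩
            simpa [List.getD_eq_getElem _ _ hel', List.getElem?_eq_getElem hel'] using hp
          · intro hs0
            have h1 := hmin hs0
            have h2 : oc xs (s-1) e ≤ oc xs (s-1) (e+1) := oc_mono_right xs (by omega)
            omega
          · rw [hans, hH]; omega
        | false =>
          -- new element even
          simp only [Bool.not_false, if_true]
          have hoc : oc xs s (e+1) = oc xs s e := by
            have := oc_snoc xs hse hel'; simpa [hp] using this
          have hec : ec xs s (e+1) = ec xs s e + 1 := by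
            have := ec_snoc xs hse hel'; simpa [hp] using this
          have hmin' : 0 < s → kk < oc xs (s-1) (e+1) := by
            intro hs0
            have h1 := hmin hs0
            have h2 : oc xs (s-1) e ≤ oc xs (s-1) (e+1) := oc_mono_right xs (by omega)
            omega
          have hH : Hh xs kk (e+1) = max (Hh xs kk e) (ec xs s (e+1)) :=
            Hh_grow_valid xs kk hse hel' (by omega) hmin'
          have hex : (e : Int) + 1 = ((e+1 : Nat) : Int) := by push_cast; ring
          have hevx : (ev : Int) + 1 = ((ev + 1 : Nat) : Int) := by push_cast; ring
          rw [hex, hevx, show max (ans : Int) ((ev + 1 : Nat) : Int) = ((max ans (ev+1) : Nat) : Int) by push_cast; rfl]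
          apply ih s (e+1) del (ev+1) (max ans (ev+1)) (by omega) (by omega) (by omega)
          · omega
          · omega
          · omega
          · intro h; omega
          · exact hmin'
          · rw [hans, hH]; omega
    · have he : e = xs.length := by omega
      rw [solnLoopA, dif_neg (by push_cast; omega)]
      rw [hans, he]

-- ===== B-side machinery: the table of odd indices =====

def isOddAt (xs : List Int) (i : Nat) : Bool := podd (xs.getD i 0)

def Qof (xs : List Int) : List Nat := (List.range xs.length).filter (isOddAt xs)

theorem range_filter_lt (n k : Nat) (h : k ≤ n) :
    (List.range n).filter (fun i => decide (i < k)) = List.range k := by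
  induction n with
  | zero => simp; omega
  | succ n ih =>
    rw [List.range_succ, List.filter_append]
    rcases Nat.lt_or_ge n k with hc | hc
    · have hk : k = n + 1 := by omega
      subst hk
      rw [List.filter_eq_self.mpr (by intro a ha; simp at ha ⊢; omega)]
      simp [List.range_succ]
    · rw [ih hc]
      simp; omega

theorem countP_not_add (l : List Int) (p : Int → Bool) :
    l.countP (fun x => !p x) + l.countP p = l.length := by
  induction l with
  | nil => simp
  | cons x xs ih => by_cases h : p x <;> simp [List.countP_cons, h] <;> omega

theorem take_eq_map_range (xs : List Int) {b : Nat} (hb : b ≤ xs.length) :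
    xs.take b = (List.range b).map (fun i => xs.getD i 0) := by
  apply List.ext_getElem
  · simp; omega
  · intro i h1 h2
    simp at h1 h2 ⊢
    rw [List.getElem?_eq_getElem (by omega)]
    rfl

theorem oc_zero_eq_filter (xs : List Int) {b : Nat} (hb : b ≤ xs.length) :
    oc xs 0 b = ((Qof xs).filter (fun i => decide (i < b))).length := by
  unfold oc Qof
  rw [List.drop_zero, take_eq_map_range xs hb, List.countP_map]
  rw [List.filter_filter]
  have h1 : (List.range xs.length).filter (fun a => decide (a < b) && isOddAt xs a)
      = ((List.range xs.length).filter (fun i => decide (i < b))).filter (isOddAt xs) := by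
    rw [List.filter_filter]
    apply List.filter_congr
    intro x _
    simp [Bool.and_comm]
  rw [h1, range_filter_lt _ _ hb, ← List.countP_eq_length_filter]
  rfl

theorem countP_getD_range (l : List Nat) (p : Nat → Bool) :
    l.countP p = (List.range l.length).countP (fun j => p (l.getD j 0)) := by
  conv_lhs => rw [show l = (List.range l.length).map (fun i => l.getD i 0) by
    apply List.ext_getElem
    · simp
    · intro i h1 h2
      simp at h2 ⊢
      rw [List.getElem?_eq_getElem (by simpa using h2)]
      rfl]
  rw [List.countP_map]
  rfl

theorem Q_sorted (xs : List Int) : (Qof xs).Pairwise (· < ·) :=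
  List.Pairwise.filter _ List.pairwise_lt_range

theorem Q_lt_length (xs : List Int) {j : Nat} (hj : j < (Qof xs).length) :
    (Qof xs).getD j 0 < xs.length := by
  have hmem : (Qof xs).getD j 0 ∈ Qof xs := by
    rw [List.getD_eq_getElem _ _ hj]
    exact List.getElem_mem hj
  unfold Qof at hmem
  simp [List.mem_filter] at hmem
  exact hmem.1

theorem Q_mono (xs : List Int) {i j : Nat} (hij : i < j) (hj : j < (Qof xs).length) :
    (Qof xs).getD i 0 < (Qof xs).getD j 0 := by
  rw [List.getD_eq_getElem _ _ (by omega), List.getD_eq_getElem _ _ hj]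
  exact List.pairwise_iff_getElem.mp (Q_sorted xs) i j (by omega) hj hij

-- K4: positions strictly below the count of odds before b lie before b
theorem Q_lt_of_lt_oc (xs : List Int) {b j : Nat} (hb : b ≤ xs.length)
    (hj : j < (Qof xs).length) (h : j < oc xs 0 b) : (Qof xs).getD j 0 < b := by
  by_contra hc
  push_neg at hc
  have hcount : oc xs 0 b = (List.range (Qof xs).length).countP
      (fun i => decide ((Qof xs).getD i 0 < b)) := by
    rw [oc_zero_eq_filter xs hb, ← List.countP_eq_length_filter, countP_getD_range]
  have hle : (List.range (Qof xs).length).countP (fun i => decide ((Qof xs).getD i 0 < b))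
      ≤ (List.range (Qof xs).length).countP (fun i => decide (i < j)) := by
    apply List.countP_mono_left
    intro i hi hpi
    simp only [decide_eq_true_eq] at hpi ⊢
    by_contra hcj
    push_neg at hcj
    rcases Nat.eq_or_lt_of_le hcj with hEq | hlt
    · rw [hEq] at hc; omega
    · have := Q_mono xs hlt (by simpa using hi)
      omega
  have hr : (List.range (Qof xs).length).countP (fun i => decide (i < j)) = j := by
    rw [List.countP_eq_length_filter, range_filter_lt _ _ (by omega)]
    simp
  omega

-- K3: if at most j odds lie before b then b does not pass the j-th odd position
theorem le_Q_of_oc_le (xs : List Int) {b j : Nat} (hb : b ≤ xs.length)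
    (hj : j < (Qof xs).length) (h : oc xs 0 b ≤ j) : b ≤ (Qof xs).getD j 0 := by
  by_contra hc
  push_neg at hc
  have hcount : oc xs 0 b = (List.range (Qof xs).length).countP
      (fun i => decide ((Qof xs).getD i 0 < b)) := by
    rw [oc_zero_eq_filter xs hb, ← List.countP_eq_length_filter, countP_getD_range]
  have hge : (List.range (Qof xs).length).countP (fun i => decide (i < j + 1))
      ≤ (List.range (Qof xs).length).countP (fun i => decide ((Qof xs).getD i 0 < b)) := by
    apply List.countP_mono_left
    intro i hi hpi
    simp only [decide_eq_true_eq] at hpi ⊢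
    rcases Nat.eq_or_lt_of_le (Nat.lt_succ_iff.mp hpi) with hEq | hlt
    · rw [hEq]; exact hc
    · have := Q_mono xs hlt hj
      omega
  have hr : (List.range (Qof xs).length).countP (fun i => decide (i < j + 1)) = j + 1 := by
    rw [List.countP_eq_length_filter, range_filter_lt _ _ (by omega)]
    simp
  omega

-- K1: the count of odds strictly before the j-th odd position is j
theorem oc_at_Q (xs : List Int) {j : Nat} (hj : j < (Qof xs).length) :
    oc xs 0 ((Qof xs).getD j 0) = j := by
  have hb : (Qof xs).getD j 0 ≤ xs.length := le_of_lt (Q_lt_length xs hj)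
  rw [oc_zero_eq_filter xs hb, ← List.countP_eq_length_filter, countP_getD_range]
  have heq : (List.range (Qof xs).length).countP (fun i => decide ((Qof xs).getD i 0 < (Qof xs).getD j 0))
      = (List.range (Qof xs).length).countP (fun i => decide (i < j)) := by
    apply List.countP_congr
    intro i hi
    simp only [decide_eq_true_eq]
    constructor
    · intro hlt
      by_contra hcj
      push_neg at hcj
      rcases Nat.eq_or_lt_of_le hcj with hEq | h2
      · rw [hEq] at hlt; omega
      · have := Q_mono xs h2 (by simpa using hi)
        omega
    · intro hlt
      exact Q_mono xs hlt hj
  rw [heq, List.countP_eq_length_filter, range_filter_lt _ _ (by omega)]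
  simp

-- K2: the count of odds before (j-th odd position + 1) is j + 1
theorem oc_at_Q_succ (xs : List Int) {j : Nat} (hj : j < (Qof xs).length) :
    oc xs 0 ((Qof xs).getD j 0 + 1) = j + 1 := by
  have hb : (Qof xs).getD j 0 + 1 ≤ xs.length := Q_lt_length xs hj
  rw [oc_zero_eq_filter xs hb, ← List.countP_eq_length_filter, countP_getD_range]
  have heq : (List.range (Qof xs).length).countP (fun i => decide ((Qof xs).getD i 0 < (Qof xs).getD j 0 + 1))
      = (List.range (Qof xs).length).countP (fun i => decide (i < j + 1)) := by
    apply List.countP_congr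
    intro i hi
    simp only [decide_eq_true_eq]
    constructor
    · intro hlt
      by_contra hcj
      push_neg at hcj
      have := Q_mono xs hcj (by simpa using hi)
      omega
    · intro hlt
      rcases Nat.eq_or_lt_of_le (Nat.lt_succ_iff.mp hlt) with hEq | h2
      · rw [hEq]; omega
      · have := Q_mono xs h2 hj
        omega
  rw [heq, List.countP_eq_length_filter, range_filter_lt _ _ (by omega)]
  simp

-- K0: the total odd count is the length of the table
theorem oc_total (xs : List Int) : oc xs 0 xs.length = (Qof xs).length := by
  rw [oc_zero_eq_filter xs (le_refl _)]
  have : (Qof xs).filter (fun i => decide (i < xs.length)) = Qof xs := by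
    apply List.filter_eq_self.mpr
    intro a ha
    have haQ : a ∈ Qof xs := ha
    unfold Qof at haQ
    simp [List.mem_filter] at haQ
    simpa using haQ.1
  rw [this]

theorem oc_split (xs : List Int) {a b : Nat} (hab : a ≤ b) :
    oc xs 0 b = oc xs 0 a + oc xs a b := by
  unfold oc
  rw [List.drop_zero]
  conv_lhs => rw [show xs.take b = xs.take a ++ (xs.take b).drop a by
    rw [show xs.take a = (xs.take b).take a by rw [List.take_take, Nat.min_eq_left hab]]
    exact (List.take_append_drop a (xs.take b)).symm]
  rw [List.countP_append]
  simp [List.take_take, Nat.min_eq_left hab]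

theorem ec_add_oc (xs : List Int) {a b : Nat} (hab : a ≤ b) (hb : b ≤ xs.length) :
    ec xs a b + oc xs a b = b - a := by
  unfold ec oc
  rw [countP_not_add]
  simp
  omega

theorem getD_append_left (l1 l2 : List Int) (i : Nat) (h : i < l1.length) :
    (l1 ++ l2).getD i 0 = l1.getD i 0 := by
  simp [List.getD, List.getElem?_append_left h]

theorem getD_append_mid (l1 l2 : List Int) : (l1 ++ l2).getD l1.length 0 = l2.getD 0 0 := by
  simp [List.getD, List.getElem?_append_right (le_refl l1.length)]

theorem foldl_max_le_int {α : Type} (l : List α) (f : α → Int) (c : Int) :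
    ∀ init, init ≤ c → (∀ x ∈ l, f x ≤ c) → l.foldl (fun acc x => max acc (f x)) init ≤ c := by
  induction l with
  | nil => intro init h0 _; simpa using h0
  | cons y ys ih =>
    intro init h0 h
    simp only [List.foldl_cons]
    apply ih
    · exact max_le h0 (h y List.mem_cons_self)
    · intro x hx; exact h x (List.mem_cons_of_mem y hx)

-- the odd-index table B builds is (Qof xs), cast to Int
theorem odds_eq (xs : List Int) :
    ((PySem.List.enumerate xs 0).filter (fun p => !(PySem.Int.mod p.2 2 == 0))).map
        (fun p => p.1)
      = (Qof xs).map (fun i : Nat => (i : Int)) := by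
  rw [PySem.List.enumerate_eq_map_pyRange xs 0, PySem.List.pyRange_one 0 _, List.map_map]
  rw [List.filter_map, List.map_map]
  have hlen : (((PySem.List.len xs) : Int) - 0).toNat = xs.length := by simp
  rw [hlen]
  unfold Qof
  rw [List.filter_congr (q := isOddAt xs) (by intro a _; simp [Function.comp, isOddAt, podd])]
  apply List.map_congr_left
  intro a ha
  simp [Function.comp]

-- the window B inspects for table slot j: it carries exactly kk odds
def aN (xs : List Int) (j : Nat) : Nat := if j = 0 then 0 else (Qof xs).getD (j-1) 0 + 1
def bN (xs : List Int) (kk j : Nat) : Nat :=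
  if j = (Qof xs).length - kk then xs.length else (Qof xs).getD (j+kk) 0

theorem window_facts (xs : List Int) (kk : Nat) (hkT : kk < (Qof xs).length)
    {j : Nat} (hj : j ≤ (Qof xs).length - kk) :
    aN xs j ≤ bN xs kk j ∧ bN xs kk j ≤ xs.length ∧ oc xs (aN xs j) (bN xs kk j) = kk := by
  have hblen : bN xs kk j ≤ xs.length := by
    unfold bN
    split_ifs with h
    · exact le_refl _
    · exact le_of_lt (Q_lt_length xs (by omega))
  have hoa : oc xs 0 (aN xs j) = j := by
    unfold aN
    split_ifs with h
    · rw [h]; exact oc_diag xs 0 0 (le_refl 0)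
    · have := oc_at_Q_succ xs (j := j-1) (by omega)
      rw [this]; omega
  have hob : oc xs 0 (bN xs kk j) = j + kk := by
    unfold bN
    split_ifs with h
    · rw [oc_total]; omega
    · exact oc_at_Q xs (by omega)
  have hab : aN xs j ≤ bN xs kk j := by
    unfold aN bN
    split_ifs with h1 h2 h2
    · omega
    · omega
    · have := Q_lt_length xs (j := j-1) (by omega)
      omega
    · have := Q_mono xs (i := j-1) (j := j+kk) (by omega) (by omega)
      omega
  refine ⟨hab, hblen, ?_⟩
  have := oc_split xs (a := aN xs j) (b := bN xs kk j) hab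
  omega

-- the sentinel-padded table lookups
theorem P_get_lo (xs : List Int) (kk : Nat) (hkT : kk < (Qof xs).length)
    {j : Nat} (hj : j ≤ (Qof xs).length - kk) :
    PySem.List.pyGetD ([(-1 : Int)] ++ (Qof xs).map (fun i : Nat => (i : Int)) ++ [(xs.length : Int)]) (j : Int) 0
      = (aN xs j : Int) - 1 := by
  rw [PySem.List.pyGetD_natCast]
  simp only [List.cons_append, List.nil_append]
  unfold aN
  split_ifs with h
  · subst h; simp
  · obtain ⟨j', rfl⟩ : ∃ j', j = j' + 1 := ⟨j - 1, by omega⟩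
    have hj' : j' < (Qof xs).length := by omega
    rw [List.getD_cons_succ]
    rw [getD_append_left _ _ _ (by simpa using hj')]
    rw [List.getD_eq_getElem _ _ (by simpa using hj'), List.getElem_map]
    simp only [Nat.add_sub_cancel]
    rw [List.getD_eq_getElem _ _ hj']
    push_cast
    omega

theorem P_get_hi (xs : List Int) (kk : Nat) (hkT : kk < (Qof xs).length)
    {j : Nat} (hj : j ≤ (Qof xs).length - kk) :
    PySem.List.pyGetD ([(-1 : Int)] ++ (Qof xs).map (fun i : Nat => (i : Int)) ++ [(xs.length : Int)]) ((j + kk + 1 : Nat) : Int) 0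
      = (bN xs kk j : Int) := by
  rw [PySem.List.pyGetD_natCast]
  simp only [List.cons_append, List.nil_append]
  rw [List.getD_cons_succ]
  unfold bN
  split_ifs with h
  · have hlen : ((Qof xs).map (fun i : Nat => (i : Int))).length = j + kk := by
      simp; omega
    rw [← hlen, getD_append_mid]
    simp
  · have hjk : j + kk < (Qof xs).length := by omega
    rw [getD_append_left _ _ _ (by simpa using hjk)]
    rw [List.getD_eq_getElem _ _ (by simpa using hjk), List.getElem_map]
    rw [List.getD_eq_getElem _ _ hjk]

theorem Hh_all (xs : List Int) (kk : Nat) (h : oc xs 0 xs.length ≤ kk) :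
    Hh xs kk xs.length = ec xs 0 xs.length := by
  apply Nat.le_antisymm
  · apply Hh_le
    intro a b hab hbe hv
    exact le_trans (ec_mono_left xs (Nat.zero_le a)) (ec_mono_right xs hbe)
  · exact le_Hh xs kk (Nat.zero_le _) (le_refl _) h

-- every valid window is covered by one of B's table windows
theorem window_cover (xs : List Int) (kk : Nat) (hkT : kk < (Qof xs).length)
    {a b : Nat} (hab : a ≤ b) (hb : b ≤ xs.length) (hv : oc xs a b ≤ kk) :
    ∃ j, j ≤ (Qof xs).length - kk ∧ ec xs a b ≤ ec xs (aN xs j) (bN xs kk j) := by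
  refine ⟨min (oc xs 0 a) ((Qof xs).length - kk), Nat.min_le_right _ _, ?_⟩
  set j := min (oc xs 0 a) ((Qof xs).length - kk) with hj
  have hja : j ≤ oc xs 0 a := Nat.min_le_left _ _
  have hjT : j ≤ (Qof xs).length - kk := Nat.min_le_right _ _
  have haN : aN xs j ≤ a := by
    unfold aN
    split_ifs with h0
    · omega
    · have := Q_lt_of_lt_oc xs (b := a) (j := j-1) (by omega) (by omega) (by omega)
      omega
  have hbN : b ≤ bN xs kk j := by
    unfold bN
    split_ifs with h0
    · omega
    · have hjoa : j = oc xs 0 a := by omega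
      have hsplit := oc_split xs hab
      have hOb : oc xs 0 b ≤ j + kk := by omega
      exact le_Q_of_oc_le xs hb (by omega) hOb
  exact le_trans (ec_mono_left xs haN) (ec_mono_right xs hbN)

-- B's branch for k < total odds computes the best valid window
theorem mainB (nums : List Int) (n k : Int) (kk : Nat) (hk : k = (kk : Int))
    (hn : 0 < n) (hlen : n ≤ (nums.length : Int)) :
    solution_alt n k nums = (Hh (nums.take n.toNat) kk (nums.take n.toNat).length : Int) := by
  subst hk
  have hk0 : ¬ ((kk : Int) < 0) := by omega
  unfold solution_alt
  simp only [if_neg hk0, if_pos hn]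
  rw [odds_eq]
  set xs := nums.take n.toNat with hxs
  set T := (Qof xs).length with hT
  simp only [List.length_map]
  have hocT : oc xs 0 xs.length = T := oc_total xs
  have hTm : T ≤ xs.length := by
    have h1 := ec_add_oc xs (a := 0) (b := xs.length) (Nat.zero_le _) (le_refl _)
    omega
  by_cases hle : (T : Int) ≤ (kk : Int)
  · rw [if_pos hle]
    rw [Hh_all xs kk (by exact_mod_cast le_of_eq_of_le hocT (by exact_mod_cast hle))]
    have h1 := ec_add_oc xs (a := 0) (b := xs.length) (Nat.zero_le _) (le_refl _)
    push_cast
    omega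
  · rw [if_neg hle]
    have hkT : kk < T := by omega
    rw [PySem.List.pyRange_one 1 _]
    rw [show (((T : Int) - (kk : Int) + 2) - 1).toNat = T - kk + 1 by omega]
    rw [List.foldl_map]
    have hfun : ∀ (acc : Int) (j : Nat), j ∈ List.range (T - kk + 1) →
        (fun best i => max best (PySem.List.pyGetD ([(-1 : Int)] ++ (Qof xs).map (fun i : Nat => (i : Int)) ++ [(xs.length : Int)]) (i + (kk : Int)) 0
          - PySem.List.pyGetD ([(-1 : Int)] ++ (Qof xs).map (fun i : Nat => (i : Int)) ++ [(xs.length : Int)]) (i - 1) 0 - 1 - (kk : Int))) acc (1 + (j : Int))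
        = max acc ((ec xs (aN xs j) (bN xs kk j) : Int)) := by
      intro acc j hjmem
      simp only [List.mem_range] at hjmem
      have hj : j ≤ T - kk := by omega
      obtain ⟨hab, hbm, hoc⟩ := window_facts xs kk hkT hj
      have hhi : (1 + (j : Int) + (kk : Int)) = ((j + kk + 1 : Nat) : Int) := by push_cast; ring
      have hlo : (1 + (j : Int) - 1) = ((j : Nat) : Int) := by push_cast; ring
      simp only [hhi, hlo, P_get_hi xs kk hkT hj, P_get_lo xs kk hkT hj]
      have hec := ec_add_oc xs hab hbm
      congr 1
      push_cast
      omega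
    rw [PySem.List.foldl_congr_mem _ _ _ _ hfun]
    set F := (List.range (T - kk + 1)).foldl (fun acc j => max acc ((ec xs (aN xs j) (bN xs kk j) : Int))) 0 with hF
    obtain ⟨hF0, hFmem⟩ := PySem.List.le_foldl_max_int (List.range (T - kk + 1))
      (fun j => ((ec xs (aN xs j) (bN xs kk j) : Nat) : Int)) 0
    apply le_antisymm
    · apply foldl_max_le_int
      · exact_mod_cast Nat.zero_le _
      · intro j hjmem
        simp only [List.mem_range] at hjmem
        have hj : j ≤ T - kk := by omega
        obtain ⟨hab, hbm, hoc⟩ := window_facts xs kk hkT hj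
        exact_mod_cast le_Hh xs kk hab hbm (le_of_eq hoc)
    · have hHle : Hh xs kk xs.length ≤ F.toNat := by
        apply Hh_le
        intro a b hab hbe hv
        obtain ⟨j, hj, hcov⟩ := window_cover xs kk hkT hab hbe hv
        have hmem : j ∈ List.range (T - kk + 1) := by simp [List.mem_range]; omega
        have := hFmem j hmem
        omega
      omega

-- k < 0: A shrinks once and stops with 0; B returns 0 by its guard
theorem A_neg_k (n k : Int) (nums : List Int) (hk : k < 0) : solution n k nums = 0 := by
  unfold solution
  by_cases hn : (0 : Int) < n
  · rw [solnLoopA, dif_pos ⟨le_refl 0, hn⟩, if_pos (by omega)]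
    cases hpar : (PySem.Int.mod (PySem.List.pyGetD nums 0 0) 2 == 0)
    · simp only [Bool.false_eq_true, if_false]
      rw [solnLoopA, dif_neg (by omega)]
      simp
    · simp only [if_true]
      rw [solnLoopA, dif_neg (by omega)]
      simp
  · rw [solnLoopA, dif_neg (by omega)]

theorem B_neg_k (n k : Int) (nums : List Int) (hk : k < 0) : solution_alt n k nums = 0 := by
  unfold solution_alt
  rw [if_pos hk]

theorem A_nonpos_n (n k : Int) (nums : List Int) (hn : ¬ (0 : Int) < n) :
    solution n k nums = 0 := by
  unfold solution
  rw [solnLoopA, dif_neg (by omega)]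

theorem B_nonpos_n (n k : Int) (nums : List Int) (hk : ¬ k < 0) (hn : ¬ (0 : Int) < n) :
    solution_alt n k nums = 0 := by
  unfold solution_alt
  rw [if_neg hk]
  simp only [if_neg hn]
  norm_num [PySem.List.enumerate_nil]
  omega

-- ===== VERDICT (by name: the statement is the Claim_ definition above) =====
theorem solution_spec : Claim_equal_solution := by
  intro n k nums _ hpre
  unfold Spec_solution
  by_cases hk : k < 0
  · rw [A_neg_k n k nums hk, B_neg_k n k nums hk]
  · by_cases hn : (0 : Int) < n
    · have hlen : n ≤ (nums.length : Int) := by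
        rcases hpre with h | ⟨h, _⟩
        · exact h
        · omega
      have hkc : k = (k.toNat : Int) := (Int.toNat_of_nonneg (by omega)).symm
      set xs := nums.take n.toNat with hxs
      have hxlen : (xs.length : Int) = n := by
        rw [hxs]
        simp [List.length_take]
        omega
      have hA := mainA nums xs k.toNat (List.take_prefix _ _) (2*xs.length)
        0 0 0 0 0 (by omega) (le_refl 0) (Nat.zero_le _)
        (oc_diag xs 0 0 (le_refl 0)).symm (ec_diag xs 0 0 (le_refl 0)).symm
        (Nat.zero_le _) (fun h => absurd h (by omega)) (fun h => absurd h (by omega))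
        (Hh_zero xs k.toNat).symm
      have hB := mainB nums n k k.toNat hkc hn hlen
      unfold solution
      rw [hkc, ← hxlen]
      push_cast at hA ⊢
      rw [hA]
      rw [hxlen, ← hkc, hB, ← hxs]
    · rw [A_nonpos_n n k nums hn, B_nonpos_n n k nums hk hn]
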